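-- pv_equiv track=rewrite | github.com/mulykoV/ProgramingTechnology | LAB2/LAB2Parctice.py | subject_max_grade
-- ===== SOURCE A (Python) =====
-- def subject_max_grade(data_dict, child):
--     """
--     Функція по заданому учню знаходить предмет із максимальним балом.
--     Повертає список предметів, якщо максимальний бал у них однаковий.
--     Параметри
--     data_dict - основний словник з даними
--     child - кортеж із даними по учню.
--     Обмеження
--     Якщо вказаної дитини немає у словнику - генерується
--     виключення ValueError.
--     """
--     max_grade = -1
--     if child not in data_dict.keys():
--         raise TypeError
--     res = []
--     pup = data_dict[child]
--     for key,val in pup.items():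
--         current_max = max(pup[key])
--         if max_grade < current_max:
--             max_grade = current_max
--     for key,val in pup.items():
--         if max_grade in pup[key]:
--             res.append(key)
--     return res
-- ===== SOURCE B (Python) =====
-- def subject_max_grade(data_dict, child):
--     # Single pass: track the running max grade and the winning subjects together.
--     pup = data_dict[child]
--     max_grade = -1
--     res = []
--     for key, grades in pup.items():
--         cur = max(grades)
--         if max_grade < cur:
--             max_grade = cur
--             res = [key]
--         elif cur == max_grade:
--             res.append(key)
--     return res
-- ===== Notes on version B (the rewrite author's own statement) =====
-- stated objective: alternative
-- what changed: Replaces A's two passes over the pupil's dict (one to find the global max via repeated lookups, one membership scan to collect subjects) with a single pass that maintains the running max grade and the current list of winning subjects together.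
import Mathlib
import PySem

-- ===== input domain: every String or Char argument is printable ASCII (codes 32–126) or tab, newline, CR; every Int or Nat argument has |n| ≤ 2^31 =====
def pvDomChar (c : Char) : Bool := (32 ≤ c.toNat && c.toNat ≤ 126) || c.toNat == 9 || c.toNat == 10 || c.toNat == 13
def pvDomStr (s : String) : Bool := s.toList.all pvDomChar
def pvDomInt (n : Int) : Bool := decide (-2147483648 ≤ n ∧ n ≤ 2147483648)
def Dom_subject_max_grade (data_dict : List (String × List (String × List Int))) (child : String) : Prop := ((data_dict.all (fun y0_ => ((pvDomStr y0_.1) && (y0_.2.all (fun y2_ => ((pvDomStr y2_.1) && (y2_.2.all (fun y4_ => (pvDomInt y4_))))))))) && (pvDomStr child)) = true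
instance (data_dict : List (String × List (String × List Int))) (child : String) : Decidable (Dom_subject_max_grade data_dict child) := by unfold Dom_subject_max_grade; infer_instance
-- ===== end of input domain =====

-- B replaces A's two passes over the pupil's dict with one pass that tracks the
-- running max grade and the winning subject list together (objective: alternative).

-- Python max(l) for a list of ints; the default 0 is only reached when l = [],
-- where Python raises ValueError (such inputs are excluded by Pre_).
def pyMax (l : List Int) : Int := (PySem.List.max? l (fun x => x)).getD 0

-- ===== PORT A =====
def subject_max_grade (data_dict : List (String × List (String × List Int))) (child : String) : List String :=
  let d := PySem.Dict.ofList data_dict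
  if d.contains child then
    let pup := PySem.Dict.ofList (d.getD child [])
    -- first loop: find the overall maximum grade, starting from the -1 sentinel
    let max_grade := pup.items.foldl
      (fun mg kv =>
        let current_max := pyMax (pup.getD kv.1 [])
        if mg < current_max then current_max else mg) (-1)
    -- second loop: collect the subjects whose grade list contains max_grade
    pup.items.foldl
      (fun res kv => if max_grade ∈ pup.getD kv.1 [] then res ++ [kv.1] else res) []
  else []  -- Python raises TypeError here; excluded by Pre_

-- ===== PORT B =====
def subject_max_grade_alt (data_dict : List (String × List (String × List Int))) (child : String) : List String :=
  let pup := PySem.Dict.ofList ((PySem.Dict.ofList data_dict).getD child [])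
  -- Python raises KeyError on a missing child; excluded by Pre_
  (pup.items.foldl
    (fun (st : Int × List String) kv =>
      let cur := pyMax kv.2
      if st.1 < cur then (cur, [kv.1])
      else if cur = st.1 then (st.1, st.2 ++ [kv.1])
      else st)
    ((-1 : Int), ([] : List String))).2

-- ===== PRECONDITION & SPEC =====
-- Pre_ excludes inputs on which A raises: a child missing from data_dict (TypeError),
-- and a pupil one of whose (effective, last-duplicate-wins) grade lists is empty
-- (ValueError from max([])). Nothing else is excluded.
def Pre_subject_max_grade (data_dict : List (String × List (String × List Int))) (child : String) : Prop :=
  (PySem.Dict.ofList data_dict).contains child = true ∧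
  ∀ kv ∈ (PySem.Dict.ofList ((PySem.Dict.ofList data_dict).getD child [])).items, kv.2 ≠ []
instance (data_dict : List (String × List (String × List Int))) (child : String) : Decidable (Pre_subject_max_grade data_dict child) := by unfold Pre_subject_max_grade; infer_instance

def pvWitness_subject_max_grade : (List (String × List (String × List Int))) × String :=
  ([("ann", [("math", [5, 3]), ("art", [5])])], "ann")

def Spec_subject_max_grade (data_dict : List (String × List (String × List Int))) (child : String) (out : List String) : Prop := out = subject_max_grade_alt data_dict child
instance (data_dict : List (String × List (String × List Int))) (child : String) (out : List String) : Decidable (Spec_subject_max_grade data_dict child out) := by unfold Spec_subject_max_grade; infer_instance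

-- ===== CLAIM (what is proved, stated in full; the proofs are below) =====
def Claim_equal_subject_max_grade : Prop := ∀ (data_dict : List (String × List (String × List Int))) (child : String), Dom_subject_max_grade data_dict child → Pre_subject_max_grade data_dict child → Spec_subject_max_grade data_dict child (subject_max_grade data_dict child)

-- ===== LEMMAS AND PROOFS =====

-- running maximum of the per-subject maxima, seeded with m
def fmax (m : Int) (l : List (String × List Int)) : Int :=
  l.foldl (fun a kv => max a (pyMax kv.2)) m

theorem pyMax_mem (l : List Int) (h : l ≠ []) : pyMax l ∈ l := by
  rcases hm : PySem.List.max? l (fun x => x) with _ | m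
  · exact absurd ((PySem.List.max?_eq_none_iff _ _).1 hm) h
  · simpa [pyMax, hm] using PySem.List.max?_mem hm

theorem pyMax_le (l : List Int) (x : Int) (hx : x ∈ l) : x ≤ pyMax l := by
  rcases hm : PySem.List.max? l (fun x => x) with _ | m
  · exact absurd ((PySem.List.max?_eq_none_iff _ _).1 hm) (by rintro rfl; cases hx)
  · simpa [pyMax, hm] using PySem.List.max?_isMax hm x hx

theorem le_fmax (m : Int) (l : List (String × List Int)) : m ≤ fmax m l := by
  induction l generalizing m with
  | nil => simp [fmax]
  | cons kv t ih =>
      calc m ≤ max m (pyMax kv.2) := le_max_left _ _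
        _ ≤ fmax (max m (pyMax kv.2)) t := ih _
        _ = fmax m (kv :: t) := rfl

theorem fmax_ub (m : Int) (l : List (String × List Int)) :
    ∀ kv ∈ l, pyMax kv.2 ≤ fmax m l := by
  induction l generalizing m with
  | nil => intro kv h; cases h
  | cons kv' t ih =>
      intro kv h
      rcases List.mem_cons.1 h with h | h
      · subst h
        calc pyMax kv.2 ≤ max m (pyMax kv.2) := le_max_right _ _
          _ ≤ fmax (max m (pyMax kv.2)) t := le_fmax _ _
      · exact ih _ kv h

-- A's first loop is the running-max fold, once the inner lookup is resolved.
theorem foldA1_eq_fmax (pup : PySem.Dict String (List Int)) (l : List (String × List Int)) (m : Int)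
    (hget : ∀ kv ∈ l, pup.getD kv.1 [] = kv.2) :
    l.foldl (fun mg kv =>
      let current_max := pyMax (pup.getD kv.1 [])
      if mg < current_max then current_max else mg) m = fmax m l := by
  induction l generalizing m with
  | nil => rfl
  | cons kv t ih =>
      have hk := hget kv (by simp)
      have ht : ∀ kv ∈ t, pup.getD kv.1 [] = kv.2 := fun kv h => hget kv (by simp [h])
      simp only [List.foldl_cons, fmax, hk]
      have : (if m < pyMax kv.2 then pyMax kv.2 else m) = max m (pyMax kv.2) := by
        rw [max_def]; split_ifs <;> omega
      rw [this]; exact ih _ ht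

-- A's second loop collects exactly the subjects whose max equals M.
theorem foldA2_eq_filter (pup : PySem.Dict String (List Int)) (l : List (String × List Int))
    (M : Int) (acc : List String)
    (hget : ∀ kv ∈ l, pup.getD kv.1 [] = kv.2)
    (hne : ∀ kv ∈ l, kv.2 ≠ [])
    (hub : ∀ kv ∈ l, pyMax kv.2 ≤ M) :
    l.foldl (fun res kv => if M ∈ pup.getD kv.1 [] then res ++ [kv.1] else res) acc
      = acc ++ (l.filter (fun kv => decide (pyMax kv.2 = M))).map (·.1) := by
  induction l generalizing acc with
  | nil => simp
  | cons kv t ih =>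
      have hk := hget kv (by simp)
      have hmem : M ∈ kv.2 ↔ pyMax kv.2 = M := by
        constructor
        · intro h
          exact le_antisymm (hub kv (by simp)) (pyMax_le _ _ h)
        · intro h; rw [← h]; exact pyMax_mem _ (hne kv (by simp))
      have ht : ∀ kv ∈ t, pup.getD kv.1 [] = kv.2 := fun kv h => hget kv (by simp [h])
      have htne : ∀ kv ∈ t, kv.2 ≠ [] := fun kv h => hne kv (by simp [h])
      have htub : ∀ kv ∈ t, pyMax kv.2 ≤ M := fun kv h => hub kv (by simp [h])
      simp only [List.foldl_cons, List.filter_cons, hk]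
      by_cases hc : pyMax kv.2 = M
      · rw [if_pos (hmem.2 hc)]
        simp only [hc, decide_true, if_pos]
        rw [ih _ ht htne htub]
        simp
      · rw [if_neg (fun h => hc (hmem.1 h))]
        simp only [hc, decide_false]
        simpa using ih _ ht htne htub

-- B's single pass: invariant tying the running state to the fold's final value.
theorem foldB_invariant (l : List (String × List Int)) (m : Int) (acc : List String) :
    l.foldl (fun (st : Int × List String) kv =>
        let cur := pyMax kv.2
        if st.1 < cur then (cur, [kv.1])
        else if cur = st.1 then (st.1, st.2 ++ [kv.1])
        else st) (m, acc)
      = (fmax m l,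
         (if m = fmax m l then acc else [])
           ++ (l.filter (fun kv => decide (pyMax kv.2 = fmax m l))).map (·.1)) := by
  induction l generalizing m acc with
  | nil => simp [fmax]
  | cons kv t ih =>
      have hfm : fmax m (kv :: t) = fmax (max m (pyMax kv.2)) t := rfl
      by_cases h1 : m < pyMax kv.2
      · have hmx : max m (pyMax kv.2) = pyMax kv.2 := max_eq_right h1.le
        have hF : fmax m (kv :: t) = fmax (pyMax kv.2) t := by rw [hfm, hmx]
        have hle : pyMax kv.2 ≤ fmax (pyMax kv.2) t := le_fmax _ _
        have hmne : ¬ m = fmax (pyMax kv.2) t := by omega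
        simp only [List.foldl_cons, List.filter_cons, hF, if_pos h1]
        rw [ih (pyMax kv.2) [kv.1], if_neg hmne]
        by_cases h2 : pyMax kv.2 = fmax (pyMax kv.2) t
        · rw [if_pos h2, if_pos (decide_eq_true h2)]; simp
        · rw [if_neg h2, if_neg (by simpa using h2)]
      · have hmx : max m (pyMax kv.2) = m := max_eq_left (by omega)
        have hF : fmax m (kv :: t) = fmax m t := by rw [hfm, hmx]
        simp only [List.foldl_cons, List.filter_cons, hF, if_neg h1]
        by_cases h2 : pyMax kv.2 = m
        · simp only [if_pos h2]
          rw [ih m (acc ++ [kv.1])]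
          by_cases h3 : m = fmax m t
          · have h4 : pyMax kv.2 = fmax m t := by omega
            rw [if_pos h3, if_pos h3, if_pos (decide_eq_true h4)]; simp
          · have h4 : ¬ pyMax kv.2 = fmax m t := by omega
            rw [if_neg h3, if_neg h3, if_neg (by simpa using h4)]
        · simp only [if_neg h2]
          rw [ih m acc]
          have h4 : ¬ pyMax kv.2 = fmax m t := by have := le_fmax m t; omega
          simp [h4]

-- ===== VERDICT (by name: the statement is the Claim_ definition above) =====
theorem subject_max_grade_spec : Claim_equal_subject_max_grade := by
  intro data_dict child _hdom hpre
  obtain ⟨hc, hne⟩ := hpre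
  unfold Spec_subject_max_grade subject_max_grade subject_max_grade_alt
  simp only [hc, if_true]
  set pup := PySem.Dict.ofList ((PySem.Dict.ofList data_dict).getD child []) with hpup
  have hnd : pup.keys.Nodup := PySem.Dict.nodup_keys_ofList _
  have hget : ∀ kv ∈ pup.items, pup.getD kv.1 [] = kv.2 := by
    rintro ⟨k, v⟩ h
    exact PySem.Dict.getD_of_mem_items pup h hnd []
  rw [foldA1_eq_fmax pup pup.items (-1) hget]
  rw [foldA2_eq_filter pup pup.items (fmax (-1) pup.items) [] hget hne (fmax_ub _ _)]
  rw [foldB_invariant pup.items (-1) []]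
  simp
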